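-- pv_equiv track=rewrite | github.com/va64doman/codility | Challenges/argon2015.py | arrayExpandLeft
-- ===== SOURCE A (Python) =====
-- def arrayExpandLeft(firstZero, seaDaysCount, seaArraySize, A):
--     expansionVal = 0
--     while seaTripHasExtraSwimDays(seaArraySize, seaDaysCount) and firstZero > 0:
--         if firstZero == 0: break
--         firstZero -= 1
--         seaArraySize += 1
--         expansionVal += 1
--     return expansionVal
--     pass
--
-- def seaTripHasExtraSwimDays(seaArraySize, numOfZeros):
--     return numOfZeros - (seaArraySize - numOfZeros) > 1
--     pass
-- ===== SOURCE B (Python) =====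
-- def arrayExpandLeft(firstZero, seaDaysCount, seaArraySize, A):
--     # closed form: steps while 2*seaDaysCount - seaArraySize > 1, at most firstZero of them
--     return min(max(firstZero, 0), max(0, 2 * seaDaysCount - seaArraySize - 1))
-- ===== Notes on version B (the rewrite author's own statement) =====
-- stated objective: simpler
-- what changed: Replaces the decrement-and-count while loop with the one-line closed form min(max(firstZero,0), max(0, 2*seaDaysCount - seaArraySize - 1)); intended as faster (O(1) vs O(firstZero)) but a timing run could not confirm it consistently, so no speed is claimed.
import Mathlib
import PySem

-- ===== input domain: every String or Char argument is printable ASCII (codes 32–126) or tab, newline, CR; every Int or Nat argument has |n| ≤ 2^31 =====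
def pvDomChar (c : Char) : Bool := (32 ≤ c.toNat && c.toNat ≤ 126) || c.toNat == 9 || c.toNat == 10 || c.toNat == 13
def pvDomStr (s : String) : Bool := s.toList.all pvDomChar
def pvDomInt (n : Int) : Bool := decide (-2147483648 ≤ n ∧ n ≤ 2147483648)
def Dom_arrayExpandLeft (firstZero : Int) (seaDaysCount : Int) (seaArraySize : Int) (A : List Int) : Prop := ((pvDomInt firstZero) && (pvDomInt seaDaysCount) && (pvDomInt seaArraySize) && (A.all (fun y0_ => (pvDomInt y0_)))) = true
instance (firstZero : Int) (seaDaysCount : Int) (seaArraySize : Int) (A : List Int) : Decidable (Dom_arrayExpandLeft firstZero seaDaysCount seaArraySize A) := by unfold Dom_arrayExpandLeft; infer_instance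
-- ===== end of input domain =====

-- B replaces A's step-by-step expansion loop by an O(1) closed-form min/max formula.


-- ===== PORT A =====
-- while-loop of A as recursion on firstZero (decreases each iteration)
def arrayExpandLeftLoop (firstZero : Int) (seaDaysCount : Int) (seaArraySize : Int) (expansionVal : Int) : Int :=
  if seaDaysCount - (seaArraySize - seaDaysCount) > 1 ∧ firstZero > 0 then
    arrayExpandLeftLoop (firstZero - 1) seaDaysCount (seaArraySize + 1) (expansionVal + 1)
  else expansionVal
termination_by firstZero.toNat
decreasing_by omega

def arrayExpandLeft (firstZero : Int) (seaDaysCount : Int) (seaArraySize : Int) (A : List Int) : Int :=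
  arrayExpandLeftLoop firstZero seaDaysCount seaArraySize 0

-- ===== PORT B =====
def arrayExpandLeft_alt (firstZero : Int) (seaDaysCount : Int) (seaArraySize : Int) (A : List Int) : Int :=
  min (max firstZero 0) (max 0 (2 * seaDaysCount - seaArraySize - 1))

-- ===== PRECONDITION & SPEC =====
def Spec_arrayExpandLeft (firstZero : Int) (seaDaysCount : Int) (seaArraySize : Int) (A : List Int) (out : Int) : Prop := out = arrayExpandLeft_alt firstZero seaDaysCount seaArraySize A
instance (firstZero : Int) (seaDaysCount : Int) (seaArraySize : Int) (A : List Int) (out : Int) : Decidable (Spec_arrayExpandLeft firstZero seaDaysCount seaArraySize A out) := by unfold Spec_arrayExpandLeft; infer_instance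

-- ===== CLAIM (what is proved, stated in full; the proofs are below) =====
def Claim_equal_arrayExpandLeft : Prop := ∀ (firstZero : Int) (seaDaysCount : Int) (seaArraySize : Int) (A : List Int), Dom_arrayExpandLeft firstZero seaDaysCount seaArraySize A → Spec_arrayExpandLeft firstZero seaDaysCount seaArraySize A (arrayExpandLeft firstZero seaDaysCount seaArraySize A)

-- ===== LEMMAS AND PROOFS =====

-- ===== VERDICT (by name: the statement is the Claim_ definition above) =====
theorem arrayExpandLeftLoop_closed (n : Nat) : ∀ (f c s e : Int), f.toNat = n →
    arrayExpandLeftLoop f c s e = e + min (max f 0) (max 0 (2 * c - s - 1)) := by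
  induction n with
  | zero =>
    intro f c s e hf
    rw [arrayExpandLeftLoop]
    have : ¬ (c - (s - c) > 1 ∧ f > 0) := by omega
    rw [if_neg this]; omega
  | succ k ih =>
    intro f c s e hf
    rw [arrayExpandLeftLoop]
    by_cases h : c - (s - c) > 1 ∧ f > 0
    · rw [if_pos h, ih (f - 1) c (s + 1) (e + 1) (by omega)]; omega
    · rw [if_neg h]; omega

theorem arrayExpandLeft_spec : Claim_equal_arrayExpandLeft := by
  intro f c s A _
  unfold Spec_arrayExpandLeft arrayExpandLeft arrayExpandLeft_alt
  rw [arrayExpandLeftLoop_closed f.toNat f c s 0 rfl]; ring
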